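-- pv_equiv track=rewrite | github.com/nradz/tronIA | nucleo.py | buscarValor
-- ===== SOURCE A (Python) =====
-- def buscarValor(matriz,valor):
-- 	"""Busca en la matriz pasada como argumento el valor dado. Solo devuelve la posicion del
-- 	primer valor coincidente. En el caso de no encontrar ninguno, devuelve (-1,-1) """
--
-- 	res=(-1,-1)
--
-- 	for y in range(len(matriz)):
--
-- 		aux=matriz[y]
--
-- 		for x in range(len(aux)):
--
-- 			if matriz[y][x]==valor:
-- 				res=(x,y)
--
-- 	return res
-- ===== SOURCE B (Python) =====
-- def buscarValor(matriz, valor):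
--     """Reverse scan: walk rows bottom-up and each row right-to-left; the first
--     match found this way is the row-major LAST occurrence, so we can return
--     immediately instead of sweeping everything and overwriting a result."""
--     for y in range(len(matriz) - 1, -1, -1):
--         fila = matriz[y]
--         for x in range(len(fila) - 1, -1, -1):
--             if fila[x] == valor:
--                 return (x, y)
--     return (-1, -1)
-- ===== Notes on version B (the rewrite author's own statement) =====
-- stated objective: alternative
-- what changed: B traverses the matrix backwards (rows bottom-up, columns right-to-left) and returns immediately on the first match, instead of A's full forward sweep that overwrites a running result.
import Mathlib
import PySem

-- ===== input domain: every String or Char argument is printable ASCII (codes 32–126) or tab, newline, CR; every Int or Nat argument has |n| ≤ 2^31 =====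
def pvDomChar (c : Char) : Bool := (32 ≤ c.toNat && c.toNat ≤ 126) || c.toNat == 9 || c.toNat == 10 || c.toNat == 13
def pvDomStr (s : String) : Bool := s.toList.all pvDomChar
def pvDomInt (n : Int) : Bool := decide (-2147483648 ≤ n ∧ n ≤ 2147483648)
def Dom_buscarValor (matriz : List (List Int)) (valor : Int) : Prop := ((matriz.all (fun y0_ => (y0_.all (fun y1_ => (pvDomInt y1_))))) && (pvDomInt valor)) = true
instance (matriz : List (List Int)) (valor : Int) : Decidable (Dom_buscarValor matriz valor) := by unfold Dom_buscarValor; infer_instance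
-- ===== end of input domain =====

-- B replaces A's full forward sweep (which overwrites a running result) by a
-- backwards traversal with early termination; same return value everywhere.

-- ===== PORT A =====
-- literal port of A: forward loops over all indices, overwriting res on each match
def buscarValor (matriz : List (List Int)) (valor : Int) : Int × Int :=
  (List.range matriz.length).foldl (fun res y =>
    let aux := matriz.getD y []
    (List.range aux.length).foldl (fun r x =>
      if aux.getD x 0 = valor then ((x : Int), (y : Int)) else r) res) (-1, -1)

-- ===== PORT B =====
-- B's inner loop: x from i down to 0, return some (x,y) on first match
def bvRow (fila : List Int) (valor : Int) (y : Nat) : Nat → Option (Int × Int)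
  | 0 => if fila.getD 0 0 = valor then some (0, (y : Int)) else none
  | x + 1 => if fila.getD (x + 1) 0 = valor then some (((x : Int) + 1), (y : Int))
             else bvRow fila valor y x
-- B's outer loop: y from i down to 0, early return when a row yields a match
def bvMat (matriz : List (List Int)) (valor : Int) : Nat → Int × Int
  | 0 =>
      let fila := matriz.getD 0 []
      match (if fila.isEmpty then none else bvRow fila valor 0 (fila.length - 1)) with
      | some p => p
      | none => (-1, -1)
  | y + 1 =>
      let fila := matriz.getD (y + 1) []
      match (if fila.isEmpty then none else bvRow fila valor (y + 1) (fila.length - 1)) with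
      | some p => p
      | none => bvMat matriz valor y

def buscarValor_alt (matriz : List (List Int)) (valor : Int) : Int × Int :=
  if matriz.isEmpty then (-1, -1) else bvMat matriz valor (matriz.length - 1)

-- ===== PRECONDITION & SPEC =====
def Spec_buscarValor (matriz : List (List Int)) (valor : Int) (out : Int × Int) : Prop := out = buscarValor_alt matriz valor
instance (matriz : List (List Int)) (valor : Int) (out : Int × Int) : Decidable (Spec_buscarValor matriz valor out) := by unfold Spec_buscarValor; infer_instance

-- ===== CLAIM (what is proved, stated in full; the proofs are below) =====
def Claim_equal_buscarValor : Prop := ∀ (matriz : List (List Int)) (valor : Int), Dom_buscarValor matriz valor → Spec_buscarValor matriz valor (buscarValor matriz valor)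

-- ===== LEMMAS AND PROOFS =====

-- generic "keep the last some" accumulator
def pvDesc {β : Type} (h : Nat → Option β) : Nat → Option β
  | 0 => h 0
  | n + 1 => match h (n + 1) with
             | some b => some b
             | none => pvDesc h n

-- an "overwrite on some" fold equals the option fold, read through getD
theorem pv_foldl_getD {β : Type} (h : Nat → Option β) :
    ∀ (l : List Nat) (o : Option β) (res : β),
      l.foldl (fun r x => (h x).getD r) (o.getD res) =
      (l.foldl (fun a x => match h x with | some b => some b | none => a) o).getD res := by
  intro l
  induction l with
  | nil => intro o res; rfl
  | cons x l ih =>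
      intro o res
      simp only [List.foldl_cons]
      have : (h x).getD (o.getD res) =
          (match h x with | some b => some b | none => o).getD res := by
        cases h x <;> rfl
      rw [this, ih]

-- the forward "last some" option fold over range (n+1) equals the descending scan
theorem pv_fold_desc {β : Type} (h : Nat → Option β) :
    ∀ n : Nat, (List.range (n + 1)).foldl
        (fun a x => match h x with | some b => some b | none => a) none = pvDesc h n := by
  intro n
  induction n with
  | zero =>
      cases h0 : h 0 <;>
        simp [List.range_succ, pvDesc, h0]
  | succ n ih =>
      rw [List.range_succ, List.foldl_append, ih]
      cases h1 : h (n + 1) <;> simp [pvDesc, h1]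

-- B's row scan is pvDesc of the per-cell test
theorem bvRow_eq_desc (fila : List Int) (valor : Int) (y : Nat) :
    ∀ i, bvRow fila valor y i =
      pvDesc (fun x => if fila.getD x 0 = valor then some ((x : Int), (y : Int)) else none) i := by
  intro i
  induction i with
  | zero => simp [bvRow, pvDesc]
  | succ x ih =>
      simp only [bvRow, pvDesc, ih]
      split_ifs <;> rfl

-- A's inner loop over one row equals B's backward row scan, read through getD
theorem row_fold (fila : List Int) (valor : Int) (y : Nat) (res : Int × Int) :
    (List.range fila.length).foldl (fun r x =>
      if fila.getD x 0 = valor then ((x : Int), (y : Int)) else r) res =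
    (if fila.isEmpty then none else bvRow fila valor y (fila.length - 1)).getD res := by
  have hbody : (fun (r : Int × Int) (x : Nat) =>
      if fila.getD x 0 = valor then ((x : Int), (y : Int)) else r) =
      (fun r x => (if fila.getD x 0 = valor then some ((x : Int), (y : Int)) else none).getD r) := by
    funext r x; split_ifs <;> rfl
  rw [hbody]
  cases hfe : fila with
  | nil => simp
  | cons a t =>
      have h0 : res = (Option.getD (α := Int × Int) none res) := rfl
      rw [List.length_cons, h0, pv_foldl_getD, pv_fold_desc]
      simp [bvRow_eq_desc]

-- the per-row result, as an option
def pvRowOpt (matriz : List (List Int)) (valor : Int) (y : Nat) : Option (Int × Int) :=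
  let fila := matriz.getD y []
  if fila.isEmpty then none else bvRow fila valor y (fila.length - 1)

theorem inner_eq (matriz : List (List Int)) (valor : Int) (y : Nat) (res : Int × Int) :
    (List.range (matriz.getD y []).length).foldl (fun r x =>
      if (matriz.getD y []).getD x 0 = valor then ((x : Int), (y : Int)) else r) res =
    (pvRowOpt matriz valor y).getD res :=
  row_fold (matriz.getD y []) valor y res

-- B's matrix scan is pvDesc of pvRowOpt, read through getD
theorem bvMat_eq_desc (matriz : List (List Int)) (valor : Int) :
    ∀ n, bvMat matriz valor n = (pvDesc (pvRowOpt matriz valor) n).getD (-1, -1) := by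
  intro n
  induction n with
  | zero =>
      simp only [bvMat, pvDesc, pvRowOpt]
      cases h : (if (matriz.getD 0 []).isEmpty then none
          else bvRow (matriz.getD 0 []) valor 0 ((matriz.getD 0 []).length - 1)) <;> simp [h]
  | succ y ih =>
      simp only [bvMat, pvDesc, pvRowOpt, ih]
      cases h : (if (matriz.getD (y + 1) []).isEmpty then none
          else bvRow (matriz.getD (y + 1) []) valor (y + 1) ((matriz.getD (y + 1) []).length - 1)) <;> simp [h]

theorem buscarValor_eq (matriz : List (List Int)) (valor : Int) :
    buscarValor matriz valor = buscarValor_alt matriz valor := by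
  unfold buscarValor buscarValor_alt
  rw [show (fun (res : Int × Int) y =>
      (List.range (matriz.getD y []).length).foldl (fun r x =>
        if (matriz.getD y []).getD x 0 = valor then ((x : Int), (y : Int)) else r) res) =
      (fun res y => (pvRowOpt matriz valor y).getD res) from
    funext fun res => funext fun y => inner_eq matriz valor y res]
  cases hm : matriz with
  | nil => simp
  | cons r t =>
      have hne : (r :: t).isEmpty = false := rfl
      have h0 : ((-1 : Int), (-1 : Int)) = (Option.getD (α := Int × Int) none ((-1 : Int), (-1 : Int))) := rfl
      rw [List.length_cons, hne, h0, pv_foldl_getD, pv_fold_desc, bvMat_eq_desc]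
      simp

-- ===== VERDICT (by name: the statement is the Claim_ definition above) =====
theorem buscarValor_spec : Claim_equal_buscarValor := by
  intro matriz valor _
  unfold Spec_buscarValor
  exact buscarValor_eq matriz valor
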